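-- pv_equiv track=rewrite | github.com/ivampo/dm_laba_1 | main.py | count_l
-- ===== SOURCE A (Python) =====
-- def count_l(functions):
--     # делаем полином жегалкина
--     count = 0
--     for i in functions:
--         states = [i]
--         while len(states[-1]) != 1:
--             state = []
--             for j in range(len(states[-1]) - 1):
--                 state.append(states[-1][j] ^ states[-1][j + 1])
--             states.append(state)
--         polinom = [i[0] for i in states]
--         flag = True
--         for ind, val in enumerate(polinom):
--             if val == 1 and ind.bit_count() != 1:
--                 flag = False
--                 break
--         if flag:
--             count += 1
--     return count
-- ===== SOURCE B (Python) =====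
-- def _submasks(t):
--     # all submasks of t, by recursion on the highest set bit
--     if t == 0:
--         return [0]
--     b = 1 << (t.bit_length() - 1)
--     s = _submasks(t - b)
--     return s + [m + b for m in s]
--
-- def _coef(f, t):
--     # Zhegalkin/ANF coefficient at mask t: XOR of f over the submasks of t
--     c = 0
--     for m in _submasks(t):
--         c ^= f[m]
--     return c
--
-- def _is_linear(f):
--     return all(_coef(f, t) != 1 or t.bit_count() == 1 for t in range(len(f)))
--
-- def count_l(functions):
--     return sum(1 for f in functions if _is_linear(f))
-- ===== Notes on version B (the rewrite author's own statement) =====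
-- stated objective: faster
-- what changed: A builds the full O(n^2) XOR-difference triangle per function to read off all Zhegalkin/ANF coefficients; B computes each coefficient directly as the XOR of the function's values over the submasks of its index (2^popcount(t) terms), checking linearity coefficient by coefficient with short-circuit.
import Mathlib
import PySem

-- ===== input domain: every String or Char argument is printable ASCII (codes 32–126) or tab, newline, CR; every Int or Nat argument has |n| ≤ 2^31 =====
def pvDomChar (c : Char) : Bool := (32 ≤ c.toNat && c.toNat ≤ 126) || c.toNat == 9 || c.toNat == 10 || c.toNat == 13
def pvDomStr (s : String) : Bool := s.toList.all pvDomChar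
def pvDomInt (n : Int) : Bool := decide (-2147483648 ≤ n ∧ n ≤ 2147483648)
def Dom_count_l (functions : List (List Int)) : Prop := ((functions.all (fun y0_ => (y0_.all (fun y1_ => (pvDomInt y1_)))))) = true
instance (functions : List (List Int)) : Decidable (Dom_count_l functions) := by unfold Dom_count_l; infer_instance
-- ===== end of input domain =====

-- B replaces A's O(n^2) difference triangle per function by computing each Zhegalkin/ANF
-- coefficient directly as the XOR of the function over the submasks of its index.

-- ===== PORT A =====
-- one inner step of the while loop: state = [row[j] ^ row[j+1] for j in range(len(row)-1)]
def diffRow (r : List Int) : List Int :=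
  (List.range (r.length - 1)).map (fun j =>
    PySem.Int.bxor (r.getD j 0) (r.getD (j + 1) 0))
  -- j and j+1 are in range by construction, so getD's default is unreachable

theorem diffRow_length (r : List Int) : (diffRow r).length = r.length - 1 := by
  simp [diffRow]

-- 'states': the while loop keeps extending states while len(states[-1]) != 1; ported as
-- recursion on the current last row.  Python loops FOREVER on an empty row (the row stays
-- empty); Pre_count_l excludes empty inner lists, and the port stops there instead.
def rowsA (r : List Int) : List (List Int) :=
  if r.length ≤ 1 then [r] else r :: rowsA (diffRow r)
termination_by r.length
decreasing_by rw [diffRow_length]; omega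

-- the flag loop: 'for ind, val in enumerate(polinom): if val == 1 and ind.bit_count() != 1: flag=False; break'
def checkA (ind : Nat) (l : List Int) : Bool :=
  match l with
  | [] => true
  | v :: rest =>
      if v = 1 ∧ PySem.Int.bitCount (ind : Int) ≠ 1 then false
      else checkA (ind + 1) rest

def pyFlagA (i : List Int) : Bool :=
  checkA 0 ((rowsA i).map (fun s => s.headI))   -- polinom = [s[0] for s in states]; rows are nonempty under Pre_

def count_l (functions : List (List Int)) : Int :=
  functions.foldl (fun count i => if pyFlagA i then count + 1 else count) 0

-- ===== PORT B =====
-- all submasks of t, by recursion on the highest set bit (1 << (t.bit_length()-1) = 2^log2 t for t > 0)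
def submasksB (t : Nat) : List Nat :=
  if t = 0 then [0]
  else
    let b := 2 ^ Nat.log2 t
    let s := submasksB (t - b)
    s ++ s.map (· + b)
termination_by t
decreasing_by
  have h1 : 0 < 2 ^ Nat.log2 t := Nat.two_pow_pos _
  have h2 := Nat.log2_self_le (by omega : t ≠ 0)
  omega

def coefB (f : List Int) (t : Nat) : Int :=
  (submasksB t).foldl (fun c m => PySem.Int.bxor c (f.getD m 0)) 0
  -- every submask m ≤ t < len f at the call sites, so getD's default is unreachable

def isLinearB (f : List Int) : Bool :=
  (List.range f.length).all (fun t =>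
    !(coefB f t == 1) || (PySem.Int.bitCount (t : Int) == 1))

def count_l_alt (functions : List (List Int)) : Int :=
  functions.foldl (fun c f => if isLinearB f then c + 1 else c) 0

-- ===== PRECONDITION & SPEC =====
-- Python A loops FOREVER (never returns) on any input containing an empty inner list:
-- the while loop keeps appending empty rows.  Pre_ excludes exactly those inputs.
def Pre_count_l (functions : List (List Int)) : Prop := ∀ f ∈ functions, f ≠ []
instance (functions : List (List Int)) : Decidable (Pre_count_l functions) := by
  unfold Pre_count_l; infer_instance

def pvWitness_count_l : List (List Int) := [[0, 1], [1, 1], [0, 1, 1, 0]]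

def Spec_count_l (functions : List (List Int)) (out : Int) : Prop := out = count_l_alt functions
instance (functions : List (List Int)) (out : Int) : Decidable (Spec_count_l functions out) := by unfold Spec_count_l; infer_instance

-- ===== CLAIM (what is proved, stated in full; the proofs are below) =====
def Claim_equal_count_l : Prop := ∀ (functions : List (List Int)), Dom_count_l functions → Pre_count_l functions → Spec_count_l functions (count_l functions)

-- ===== LEMMAS AND PROOFS =====

-- ---- bxor algebra ----
theorem bxor_ns_cast (m n : Nat) : PySem.Int.bxor (Int.negSucc m) (n : Int) = Int.negSucc (m ^^^ n) := by
  unfold PySem.Int.bxor; simp [Int.negSucc_eq]; rw [if_neg (by omega)]; ring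

theorem bxor_cast_ns (m n : Nat) : PySem.Int.bxor (m : Int) (Int.negSucc n) = Int.negSucc (m ^^^ n) := by
  unfold PySem.Int.bxor; simp [Int.negSucc_eq]; rw [if_neg (by omega)]; ring

theorem bxor_ns_ns (m n : Nat) : PySem.Int.bxor (Int.negSucc m) (Int.negSucc n) = ((m ^^^ n : Nat) : Int) := by
  unfold PySem.Int.bxor; simp [Int.negSucc_eq]; rw [if_neg (by omega), if_neg (by omega)]

theorem bxor_assoc' (a b c : Int) :
    PySem.Int.bxor (PySem.Int.bxor a b) c = PySem.Int.bxor a (PySem.Int.bxor b c) := by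
  rcases a with m | m <;> rcases b with n | n <;> rcases c with k | k <;>
    simp [Int.ofNat_eq_natCast, PySem.Int.bxor_natCast, bxor_ns_cast, bxor_cast_ns, bxor_ns_ns, Nat.xor_assoc]

theorem bxor_zero_left (a : Int) : PySem.Int.bxor 0 a = a := by
  rw [PySem.Int.bxor_comm]; exact PySem.Int.bxor_zero a

theorem bxor_cancel_mid (a b c : Int) :
    PySem.Int.bxor (PySem.Int.bxor a b) (PySem.Int.bxor b c) = PySem.Int.bxor a c := by
  rw [bxor_assoc', ← bxor_assoc' b b c, PySem.Int.bxor_self, bxor_zero_left]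

-- ---- XOR-folds ----
theorem foldl_bxor_init {α : Type} (L : List α) (f : α → Int) (a : Int) :
    L.foldl (fun c m => PySem.Int.bxor c (f m)) a
      = PySem.Int.bxor a (L.foldl (fun c m => PySem.Int.bxor c (f m)) 0) := by
  induction L generalizing a with
  | nil => simp
  | cons x xs ih =>
      simp only [List.foldl_cons]
      rw [ih, ih (PySem.Int.bxor 0 (f x)), bxor_zero_left, bxor_assoc']

theorem F_append {α : Type} (L1 L2 : List α) (f : α → Int) :
    (L1 ++ L2).foldl (fun c m => PySem.Int.bxor c (f m)) 0
      = PySem.Int.bxor (L1.foldl (fun c m => PySem.Int.bxor c (f m)) 0)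
                       (L2.foldl (fun c m => PySem.Int.bxor c (f m)) 0) := by
  rw [List.foldl_append, foldl_bxor_init]

theorem F_congr {α : Type} (L : List α) (f g : α → Int) (h : ∀ m ∈ L, f m = g m) :
    L.foldl (fun c m => PySem.Int.bxor c (f m)) 0
      = L.foldl (fun c m => PySem.Int.bxor c (g m)) 0 := by
  induction L with
  | nil => rfl
  | cons x xs ih =>
      simp only [List.foldl_cons]
      rw [foldl_bxor_init xs f, foldl_bxor_init xs g,
        h x (List.mem_cons_self), ih (fun m hm => h m (List.mem_cons_of_mem _ hm))]

theorem F_pair {α : Type} (L : List α) (f g : α → Int) :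
    L.foldl (fun c m => PySem.Int.bxor c (PySem.Int.bxor (f m) (g m))) 0
      = PySem.Int.bxor (L.foldl (fun c m => PySem.Int.bxor c (f m)) 0)
                       (L.foldl (fun c m => PySem.Int.bxor c (g m)) 0) := by
  induction L with
  | nil => simp
  | cons x xs ih =>
      simp only [List.foldl_cons]
      rw [foldl_bxor_init xs, foldl_bxor_init xs f, foldl_bxor_init xs g, ih]
      rw [bxor_zero_left, bxor_zero_left, bxor_zero_left]
      -- (fx ^ gx) ^ (F ^ G) = (fx ^ F) ^ (gx ^ G)
      rw [bxor_assoc', bxor_assoc']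
      congr 1
      rw [← bxor_assoc', ← bxor_assoc', PySem.Int.bxor_comm (g x)]

-- ---- the difference triangle computes submask XORs ----
theorem iterate_diffRow_length (t : Nat) (r : List Int) :
    (diffRow^[t] r).length = r.length - t := by
  induction t generalizing r with
  | zero => simp
  | succ k ih => rw [Function.iterate_succ_apply, ih, diffRow_length]; omega

theorem diffRow_getD (r : List Int) (i : Nat) (h : i + 1 < r.length) :
    (diffRow r).getD i 0 = PySem.Int.bxor (r.getD i 0) (r.getD (i + 1) 0) := by
  have hi : i < r.length - 1 := by omega
  simp [diffRow, List.getD_eq_getElem?_getD, hi]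

theorem pow2_diff (k : Nat) : ∀ (r : List Int) (i : Nat), i + 2 ^ k < r.length →
    (diffRow^[2 ^ k] r).getD i 0 = PySem.Int.bxor (r.getD i 0) (r.getD (i + 2 ^ k) 0) := by
  induction k with
  | zero =>
      intro r i h
      simpa using diffRow_getD r i (by simpa using h)
  | succ k ih =>
      intro r i h
      rw [pow_succ] at h ⊢
      generalize hgen : 2 ^ k = m at *
      have hm : m * 2 = m + m := by omega
      rw [hm] at h ⊢
      rw [Function.iterate_add_apply]
      have hlen : (diffRow^[m] r).length = r.length - m := iterate_diffRow_length _ _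
      rw [ih _ i (by rw [hlen]; omega)]
      rw [ih r i (by omega), ih r (i + m) (by omega)]
      rw [show i + m + m = i + (m + m) by omega]
      exact bxor_cancel_mid _ _ _

theorem submasksB_eq (t : Nat) (ht : t ≠ 0) :
    submasksB t = submasksB (t - 2 ^ Nat.log2 t)
      ++ (submasksB (t - 2 ^ Nat.log2 t)).map (· + 2 ^ Nat.log2 t) := by
  rw [submasksB]; simp [ht]

theorem submasksB_le (t : Nat) : ∀ m ∈ submasksB t, m ≤ t := by
  fun_induction submasksB t with
  | case1 => simp
  | case2 t ht b s ih =>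
      intro m hm
      have h2 := Nat.log2_self_le (ht : t ≠ 0)
      subst b s
      generalize hp : 2 ^ Nat.log2 t = p at *
      rcases List.mem_append.1 hm with h | h
      · have := ih m h; omega
      · rcases List.mem_map.1 h with ⟨m', hm', rfl⟩
        have := ih m' hm'; omega

theorem main_mask (t : Nat) : ∀ (r : List Int) (i : Nat), i + t < r.length →
    (diffRow^[t] r).getD i 0
      = (submasksB t).foldl (fun c m => PySem.Int.bxor c (r.getD (i + m) 0)) 0 := by
  induction t using Nat.strong_induction_on with
  | _ t ih =>
    intro r i hlen
    by_cases ht : t = 0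
    · subst ht
      simp [submasksB, bxor_zero_left]
    · -- t = t' + b with b = 2 ^ log2 t the highest set bit
      have hb1 : 0 < 2 ^ Nat.log2 t := Nat.two_pow_pos _
      have hb2 := Nat.log2_self_le ht
      have hsplit : t = (t - 2 ^ Nat.log2 t) + 2 ^ Nat.log2 t := by omega
      have hlt : t - 2 ^ Nat.log2 t < t := by omega
      have hys : (diffRow^[2 ^ Nat.log2 t] r).length = r.length - 2 ^ Nat.log2 t :=
        iterate_diffRow_length _ _
      rw [show diffRow^[t] r = diffRow^[t - 2 ^ Nat.log2 t] (diffRow^[2 ^ Nat.log2 t] r) by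
        rw [← Function.iterate_add_apply, ← hsplit]]
      rw [ih _ hlt _ i (by rw [hys]; omega)]
      rw [F_congr _ _ (fun m => PySem.Int.bxor (r.getD (i + m) 0) (r.getD (i + m + 2 ^ Nat.log2 t) 0))
        (by
          intro m hm
          have hmle := submasksB_le _ m hm
          exact pow2_diff _ r (i + m) (by omega))]
      rw [F_pair]
      rw [submasksB_eq t ht, F_append]
      congr 1
      rw [List.foldl_map]
      exact F_congr _ _ _ (by intro m hm; rw [Nat.add_assoc])

theorem rowsA_eq (r : List Int) : 1 ≤ r.length →
    rowsA r = (List.range r.length).map (fun t => diffRow^[t] r) := by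
  fun_induction rowsA r with
  | case1 r hle =>
      intro h1
      have h : r.length = 1 := by omega
      rw [h]
      simp
  | case2 r hgt ih =>
      intro _
      have hd : (diffRow r).length = r.length - 1 := diffRow_length r
      rw [ih (by omega)]
      rw [show r.length = (r.length - 1) + 1 by omega, List.range_succ_eq_map]
      simp only [List.map_cons, List.map_map, Function.iterate_zero_apply, hd]
      congr 1

theorem headI_eq_getD (l : List Int) : l.headI = l.getD 0 0 := by
  cases l <;> rfl

theorem checkA_iff (l : List Int) : ∀ (ind : Nat),
    checkA ind l = true ↔
      ∀ j < l.length, ¬(l.getD j 0 = 1 ∧ PySem.Int.bitCount ((ind + j : Nat) : Int) ≠ 1) := by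
  induction l with
  | nil => intro ind; simp [checkA]
  | cons v rest ih =>
      intro ind
      rw [checkA]
      by_cases hv : v = 1 ∧ PySem.Int.bitCount (ind : Int) ≠ 1
      · rw [if_pos hv]
        simp only [Bool.false_eq_true, false_iff]
        intro hall
        exact hall 0 (by simp) (by simpa using hv)
      · rw [if_neg hv, ih (ind + 1)]
        constructor
        · intro hall j hj
          cases j with
          | zero => simpa using hv
          | succ j' =>
              have := hall j' (by simpa using hj)
              simpa [Nat.add_assoc, Nat.add_comm 1 j'] using this
        · intro hall j hj
          have := hall (j + 1) (by simpa using hj)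
          simpa [Nat.add_assoc, Nat.add_comm 1 j] using this

theorem getD_map_range (g : Nat → Int) (n j : Nat) (hj : j < n) :
    ((List.range n).map g).getD j 0 = g j := by
  simp [List.getD_eq_getElem?_getD, hj]

theorem coefB_eq (f : List Int) (t : Nat) (ht : t < f.length) :
    (diffRow^[t] f).headI = coefB f t := by
  rw [headI_eq_getD, main_mask t f 0 (by omega)]
  exact F_congr _ _ _ (by intro m hm; rw [Nat.zero_add])

theorem flag_eq (f : List Int) (hf : f ≠ []) : pyFlagA f = isLinearB f := by
  have hn : 1 ≤ f.length := List.length_pos_of_ne_nil hf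
  rw [Bool.eq_iff_iff]
  unfold pyFlagA
  rw [rowsA_eq f hn, List.map_map, checkA_iff]
  unfold isLinearB
  simp only [List.length_map, List.length_range, List.all_eq_true, List.mem_range]
  constructor
  · intro hall t htn
    have := hall t htn
    rw [getD_map_range _ _ _ htn] at this
    simp only [Function.comp_apply] at this
    rw [coefB_eq f t htn] at this
    simp only [Nat.zero_add] at this
    by_cases hc : coefB f t = 1
    · have h2 : PySem.Int.bitCount (t : Int) = 1 := by tauto
      simp [hc, h2]
    · simp [hc]
  · intro hall j hj
    have := hall j hj
    rw [getD_map_range _ _ _ hj]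
    simp only [Function.comp_apply]
    rw [coefB_eq f j hj]
    simp only [Nat.zero_add]
    simp only [Bool.or_eq_true, Bool.not_eq_eq_eq_not, Bool.not_true, beq_iff_eq,
      beq_eq_false_iff_ne] at this ⊢
    tauto

-- ===== VERDICT (by name: the statement is the Claim_ definition above) =====
theorem count_l_spec : Claim_equal_count_l := by
  intro functions _ hpre
  unfold Spec_count_l count_l count_l_alt
  apply PySem.List.foldl_congr_mem
  intro acc g hg
  rw [flag_eq g (hpre g hg)]
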